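-- pv_equiv track=rewrite | github.com/Olokor/flask-todo | python assignment/Grading System/Grading_system.py | get_student_position
-- ===== SOURCE A (Python) =====
-- def get_student_position(student_average: list, number_of_student: int):
--     student_position = []
--
--     for i in range(number_of_student):
--         position = 1
--         for j in range(number_of_student):
--             if student_average[j] > student_average[i]:  # Compare averages
--                 position += 1
--         student_position.append(position)  # Store position in the list
--
--     return student_position
-- ===== SOURCE B (Python) =====
-- def get_student_position(student_average: list, number_of_student: int):
--     prefix = student_average[:max(0, number_of_student)]
--     ranked = sorted(prefix, reverse=True)
--     rank = {}
--     for idx, value in enumerate(ranked):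
--         if value not in rank:
--             rank[value] = idx + 1
--     return [rank[value] for value in prefix]
-- ===== Notes on version B (the rewrite author's own statement) =====
-- stated objective: faster
-- what changed: A counts strictly-greater averages with a nested O(n^2) pair scan; B sorts the prefix once in descending order, assigns each distinct value its first-occurrence index + 1 as rank in one scan into a dict, and maps every student through that dict.
import Mathlib
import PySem

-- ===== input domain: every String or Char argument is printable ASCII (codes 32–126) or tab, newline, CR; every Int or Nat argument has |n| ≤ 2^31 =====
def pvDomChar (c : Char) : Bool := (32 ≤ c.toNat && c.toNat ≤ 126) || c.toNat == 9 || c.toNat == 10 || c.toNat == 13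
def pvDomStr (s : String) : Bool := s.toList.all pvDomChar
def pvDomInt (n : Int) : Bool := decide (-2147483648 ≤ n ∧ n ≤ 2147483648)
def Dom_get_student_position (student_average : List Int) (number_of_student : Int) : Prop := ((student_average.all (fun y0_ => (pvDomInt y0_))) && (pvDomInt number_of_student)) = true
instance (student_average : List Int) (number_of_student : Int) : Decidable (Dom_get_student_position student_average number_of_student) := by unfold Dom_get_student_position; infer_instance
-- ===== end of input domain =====

-- B replaces A's O(n^2) all-pairs comparison by a single sort plus a first-occurrence
-- rank dictionary (O(n log n)); equal return value on every input where A returns.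

-- ===== PORT A =====
-- A's indexing student_average[j] raises IndexError when the index is out of range;
-- Pre_ excludes exactly those inputs, so the .getD 0 default is never the value used.
def get_student_position (student_average : List Int) (number_of_student : Int) : List Int :=
  (PySem.List.pyRange 0 number_of_student 1).foldl (fun student_position i =>
    let position :=
      (PySem.List.pyRange 0 number_of_student 1).foldl (fun position j =>
        if ((PySem.List.pyGet? student_average j).getD 0) > ((PySem.List.pyGet? student_average i).getD 0)
        then position + 1 else position) (1 : Int)
    student_position ++ [position]) []

-- ===== PORT B =====
-- 'for idx, value in enumerate(ranked): if value not in rank: rank[value] = idx + 1'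
def pvBuildRanks : List Int → Int → PySem.Dict Int Int → PySem.Dict Int Int
  | [], _, rank => rank
  | value :: rest, idx, rank =>
      pvBuildRanks rest (idx + 1) (if rank.contains value then rank else rank.insert value (idx + 1))

def get_student_position_alt (student_average : List Int) (number_of_student : Int) : List Int :=
  let pfx := PySem.List.slice student_average none (some (max 0 number_of_student))
  let ranked := PySem.List.sorted pfx (fun x => x) true
  let rank := pvBuildRanks ranked 0 PySem.Dict.empty
  -- rank[value]: every value of pfx is a key of rank, so the 0 default is never used
  pfx.map (fun value => rank.getD value 0)

-- ===== PRECONDITION & SPEC =====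
-- A raises IndexError iff number_of_student exceeds the list length; those inputs are excluded.
def Pre_get_student_position (student_average : List Int) (number_of_student : Int) : Prop :=
  number_of_student ≤ (student_average.length : Int)
instance (student_average : List Int) (number_of_student : Int) : Decidable (Pre_get_student_position student_average number_of_student) := by unfold Pre_get_student_position; infer_instance

def pvWitness_get_student_position : List Int × Int := ([3, 1, 3, 2], 4)

def Spec_get_student_position (student_average : List Int) (number_of_student : Int) (out : List Int) : Prop := out = get_student_position_alt student_average number_of_student
instance (student_average : List Int) (number_of_student : Int) (out : List Int) : Decidable (Spec_get_student_position student_average number_of_student out) := by unfold Spec_get_student_position; infer_instance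

-- ===== CLAIM (what is proved, stated in full; the proofs are below) =====
def Claim_equal_get_student_position : Prop := ∀ (student_average : List Int) (number_of_student : Int), Dom_get_student_position student_average number_of_student → Pre_get_student_position student_average number_of_student → Spec_get_student_position student_average number_of_student (get_student_position student_average number_of_student)


-- ===== LEMMAS AND PROOFS =====

-- once a key is present, pvBuildRanks never changes its value
lemma pvBuildRanks_get?_of_some (s : List Int) (k : Int) (d : PySem.Dict Int Int)
    (v x : Int) (h : d.get? v = some x) : (pvBuildRanks s k d).get? v = some x := by
  induction s generalizing k d with
  | nil => simpa [pvBuildRanks] using h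
  | cons a t ih =>
      simp only [pvBuildRanks]
      split
      · exact ih _ _ h
      · apply ih
        rcases eq_or_ne v a with rfl | hne
        · simp_all [PySem.Dict.contains_eq_isSome_get?]
        · rwa [PySem.Dict.get?_insert_of_ne _ _ hne]

-- on a descending list s, the rank stored for v ∈ s is k + 1 + (#elements of s strictly above v)
lemma pvBuildRanks_getD (s : List Int) (k : Int) (d : PySem.Dict Int Int)
    (hs : s.Pairwise (fun a b => b ≤ a)) (v : Int) (hv : v ∈ s) (hd : d.get? v = none) :
    (pvBuildRanks s k d).getD v 0 = k + 1 + (s.countP (fun a => decide (v < a)) : Int) := by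
  induction s generalizing k d with
  | nil => simp at hv
  | cons a t ih =>
      rcases List.pairwise_cons.mp hs with ⟨ha, ht⟩
      simp only [pvBuildRanks]
      rcases eq_or_ne v a with rfl | hne
      · have hc : d.contains v = false := by
          simp [PySem.Dict.contains_eq_isSome_get?, hd]
        rw [hc]
        simp only [Bool.false_eq_true, if_false]
        have hget := pvBuildRanks_get?_of_some t (k + 1) (d.insert v (k + 1)) v (k + 1)
          (PySem.Dict.get?_insert_self d v (k + 1))
        rw [PySem.Dict.getD_eq_get?_getD, hget]
        have hcount : t.countP (fun a => decide (v < a)) = 0 := by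
          rw [List.countP_eq_zero]
          intro x hx
          simpa using not_lt.mpr (ha x hx)
        simp [hcount]
      · have hvt : v ∈ t := by
          rcases List.mem_cons.mp hv with h | h
          · exact absurd h hne
          · exact h
        have hva : v < a := lt_of_le_of_ne (ha v hvt) hne
        have hcnt : (a :: t).countP (fun x => decide (v < x)) = t.countP (fun x => decide (v < x)) + 1 := by
          simp [hva]
        split
        · rw [ih _ _ ht hvt hd, hcnt]; push_cast; ring
        · have hd' : (d.insert a (k + 1)).get? v = none := by
            rwa [PySem.Dict.get?_insert_of_ne _ _ hne]
          rw [ih _ _ ht hvt hd', hcnt]; push_cast; ring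

-- the inner j-loop count over the first m indices equals a countP over the taken prefix
lemma countP_map_range (avg : List Int) (m : Nat) (hm : m ≤ avg.length) (x : Int) :
    ((List.range m).map (fun k : Nat => (k : Int))).countP
        (fun j => decide (x < (PySem.List.pyGet? avg j).getD 0)) =
    (avg.take m).countP (fun a => decide (x < a)) := by
  induction m with
  | zero => simp
  | succ n ih =>
      have hn : n < avg.length := by omega
      rw [List.range_succ, List.map_append, List.countP_append, ih (by omega),
        List.take_add_one, List.countP_append]
      simp [PySem.List.pyGet?_natCast, List.getElem?_eq_getElem hn, List.countP_cons]

-- ===== VERDICT (by name: the statement is the Claim_ definition above) =====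
theorem get_student_position_spec : Claim_equal_get_student_position := by
  intro avg n _ hpre
  unfold Pre_get_student_position at hpre
  unfold Spec_get_student_position get_student_position get_student_position_alt
  by_cases hn : n ≤ 0
  · have h1 : PySem.List.pyRange 0 n 1 = [] := by
      simp [PySem.List.pyRange]; omega
    have h2 : (max 0 n : Int) = ((0 : Nat) : Int) := by simp; omega
    rw [h1, h2, PySem.List.slice_to_natCast]
    simp
  · have hnm : n = ((n.toNat : Nat) : Int) := by omega
    set m := n.toNat with hmdef
    have hm : m ≤ avg.length := by omega
    rw [hnm]
    have h2 : (max 0 ((m : Nat) : Int)) = ((m : Nat) : Int) := by simp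
    rw [h2, PySem.List.pyRange_zero_natCast, PySem.List.slice_to_natCast,
      PySem.List.foldl_append_singleton_eq_map]
    simp only [List.nil_append, List.map_map]
    apply List.ext_getElem
    · simp [hm]
    · intro i h1 h2
      simp only [List.length_map, List.length_range] at h1
      simp only [List.getElem_map, Function.comp_apply, List.getElem_range]
      rw [PySem.List.foldl_ite_add_one]
      simp only [gt_iff_lt, List.getElem_take]
      have hlen : i < avg.length := by omega
      have hiv : (PySem.List.pyGet? avg ((i : Nat) : Int)).getD 0 = avg[i]'hlen := by
        simp [PySem.List.pyGet?_natCast, List.getElem?_eq_getElem hlen]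
      rw [hiv, countP_map_range avg m hm (avg[i]'hlen)]
      have hmem : avg[i]'hlen ∈ PySem.List.sorted (avg.take m) (fun x => x) true := by
        rw [PySem.List.mem_sorted]
        exact (List.getElem_take (xs := avg) (j := m) (i := i)
          (h := by simpa [hm] using h1)) ▸ List.getElem_mem _
      have hrank := pvBuildRanks_getD (PySem.List.sorted (avg.take m) (fun x => x) true) 0
        PySem.Dict.empty (PySem.List.sorted_pairwise_rev _ _) _ hmem (PySem.Dict.get?_empty _)
      rw [hrank, (PySem.List.sorted_perm (avg.take m) (fun x => x) true).countP_eq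
        (fun a => decide (avg[i]'hlen < a))]
      ring
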